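-- pv_equiv track=rewrite | github.com/test-ndpete-org/byu-ws-sdk-python | byu_ws_sdk/core.py | _sort_params
-- ===== SOURCE A (Python) =====
-- def _sort_params(params_str):
--     """
--     Taking params of the form:
--     p=1&a=9&a=0
--     This function returns:
--     a=9,0&p=1
--     As required by the security code
--     """
--     params = {}
--     # params_str is now p=1&a=9&a=0
--     tokens = params_str.split("&")
--     # tokens is now ["p=1", "a=9", "a=0"]
--     if len(tokens) == 1:
--         return params_str  # no '&' as in "a=1" or "" as the whole params
--     else:
--         # now sort and join
--         for token in tokens:
--             key, value = token.split("=", 1)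
--             if not key in params.keys():
--                 params[key] = value
--             else:
--                 params[key] = params[key] + "," + value
--     return_value = "&".join(["%s=%s" % (key, params[key]) for key in sorted(params.keys())])
--     return return_value
-- ===== SOURCE B (Python) =====
-- def _sort_params(params_str):
--     tokens = params_str.split("&")
--     if len(tokens) == 1:
--         return params_str  # no '&' as in "a=1" or "" as the whole params
--     pairs = [token.split("=", 1) for token in tokens]
--     keys = sorted({k for k, _ in pairs})
--     return "&".join(
--         "%s=%s" % (k, ",".join(v for kk, v in pairs if kk == k)) for k in keys
--     )
-- ===== Notes on version B (the rewrite author's own statement) =====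
-- stated objective: alternative
-- what changed: B drops A's one-pass dict-grouping: it splits every token into (key, value) pairs, sorts the distinct keys, and collects each key's values with one filter pass per key.
import Mathlib
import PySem

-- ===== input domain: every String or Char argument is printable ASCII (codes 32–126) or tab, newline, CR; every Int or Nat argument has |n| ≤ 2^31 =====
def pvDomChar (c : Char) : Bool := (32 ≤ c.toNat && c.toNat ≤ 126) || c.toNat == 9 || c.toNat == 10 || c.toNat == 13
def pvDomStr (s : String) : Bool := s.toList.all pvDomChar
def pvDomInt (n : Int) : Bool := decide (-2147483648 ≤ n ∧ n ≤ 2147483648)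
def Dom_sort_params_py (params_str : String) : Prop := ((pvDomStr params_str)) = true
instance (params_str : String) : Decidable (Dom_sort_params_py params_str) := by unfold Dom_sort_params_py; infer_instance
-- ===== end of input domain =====

-- B replaces A's one-pass dict grouping by "sort the distinct keys, then collect each key's
-- values with one filter pass per key" (alternative decomposition, not claimed faster).

-- ===== PORT A =====

-- token.split("=", 1) unpacked as 'key, value': the fallback ("", "") is unreachable under
-- Pre_sort_params_py (Python raises ValueError when the token has no '='); both Pythons
-- evaluate this same expression, so both ports share the helper.
def pvSplitEq (t : String) : String × String :=
  match PySem.Str.splitMax? t "=" 1 with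
  | some (k :: v :: _) => (k, v)
  | _ => ("", "")

-- the body of A's 'for token in tokens' loop
def pvStepA (d : PySem.Dict String String) (p : String × String) : PySem.Dict String String :=
  if d.contains p.1 then d.insert p.1 (d.getD p.1 "" ++ "," ++ p.2)
  else d.insert p.1 p.2

def sort_params_py (params_str : String) : String :=
  -- params_str.split("&"): sep ≠ "" so split? is always 'some'; .getD [] is unreachable
  let tokens := (PySem.Str.split? params_str "&").getD []
  if tokens.length = 1 then params_str
  else
    let params := tokens.foldl (fun d token => pvStepA d (pvSplitEq token)) PySem.Dict.empty
    PySem.Str.join "&" ((PySem.List.sorted params.keys (fun k => k) false).map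
      (fun k => k ++ "=" ++ params.getD k ""))

-- ===== PORT B =====

def sort_params_py_alt (params_str : String) : String :=
  let tokens := (PySem.Str.split? params_str "&").getD []
  if tokens.length = 1 then params_str
  else
    let pairs := tokens.map pvSplitEq
    let keys := PySem.List.sorted (PySem.Set.ofList (pairs.map (·.1))) (fun k => k) false
    PySem.Str.join "&" (keys.map (fun k =>
      k ++ "=" ++ PySem.Str.join "," ((pairs.filter (fun p => p.1 == k)).map (·.2))))

-- ===== PRECONDITION & SPEC =====

-- Pre_ excludes exactly the inputs where A raises ValueError: two or more '&'-tokens and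
-- some token without '=' (token.split("=", 1) then yields one piece and 'key, value = …' fails).
def Pre_sort_params_py (params_str : String) : Prop :=
  ((PySem.Str.split? params_str "&").getD []).length = 1 ∨
    ∀ t ∈ (PySem.Str.split? params_str "&").getD [], PySem.Str.isIn "=" t = true
instance (params_str : String) : Decidable (Pre_sort_params_py params_str) := by
  unfold Pre_sort_params_py; infer_instance

def pvWitness_sort_params_py : String := "p=1&a=9&a=0"

def Spec_sort_params_py (params_str : String) (out : String) : Prop := out = sort_params_py_alt params_str
instance (params_str : String) (out : String) : Decidable (Spec_sort_params_py params_str out) := by unfold Spec_sort_params_py; infer_instance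

-- ===== CLAIM (what is proved, stated in full; the proofs are below) =====
def Claim_equal_sort_params_py : Prop := ∀ (params_str : String), Dom_sort_params_py params_str → Pre_sort_params_py params_str → Spec_sort_params_py params_str (sort_params_py params_str)

-- ===== LEMMAS AND PROOFS =====

theorem pv_witness_ok :
    Dom_sort_params_py pvWitness_sort_params_py ∧ Pre_sort_params_py pvWitness_sort_params_py := by
  decide

theorem strJoin_singleton (s x : String) : PySem.Str.join s [x] = x := by
  apply String.toList_inj.mp
  rw [PySem.Str.toList_join]
  simp [PySem.Chars.join_singleton]

theorem strJoin_glue (s a b : String) (l : List String) :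
    PySem.Str.join s ((a ++ s ++ b) :: l) = PySem.Str.join s (a :: b :: l) := by
  apply String.toList_inj.mp
  cases l with
  | nil =>
      rw [PySem.Str.toList_join, PySem.Str.toList_join]
      simp [PySem.Chars.join_singleton, PySem.Chars.join_cons_cons, String.toList_append]
  | cons y ys =>
      rw [PySem.Str.toList_join, PySem.Str.toList_join]
      simp only [List.map_cons, PySem.Chars.join_cons_cons, String.toList_append]
      simp [List.append_assoc]

-- A's loop, characterised: the dict entry at k is the ','-join of the values whose key is k
theorem foldA_getD (pairs : List (String × String)) (k : String) (d : PySem.Dict String String) :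
    (pairs.foldl pvStepA d).getD k "" =
      if d.contains k then
        PySem.Str.join "," (d.getD k "" :: (pairs.filter (fun p => p.1 == k)).map (·.2))
      else PySem.Str.join "," ((pairs.filter (fun p => p.1 == k)).map (·.2)) := by
  induction pairs generalizing d with
  | nil =>
      cases h : d.contains k with
      | true => simp [strJoin_singleton]
      | false =>
          simp only [List.foldl_nil, List.filter_nil, List.map_nil, Bool.false_eq_true,
            if_false]
          rw [PySem.Dict.getD_of_not_contains d "" h]
          apply String.toList_inj.mp
          rw [PySem.Str.toList_join]
          simp [PySem.Chars.join_nil]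
  | cons p rest ih =>
      simp only [List.foldl_cons]
      rw [ih]
      by_cases hpk : p.1 = k
      · have hc : (pvStepA d p).contains k = true := by
          unfold pvStepA
          split <;> simp [hpk]
        rw [if_pos hc]
        have hfil : (p :: rest).filter (fun q => q.1 == k) = p :: rest.filter (fun q => q.1 == k) := by
          simp [hpk]
        rw [hfil]
        cases h : d.contains k with
        | true =>
            have hg : (pvStepA d p).getD k "" = d.getD k "" ++ "," ++ p.2 := by
              unfold pvStepA
              rw [if_pos (by rwa [hpk])]
              rw [hpk, PySem.Dict.getD_insert_self]
            rw [hg, if_pos rfl]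
            simp only [List.map_cons]
            exact strJoin_glue "," (d.getD k "") p.2 _
        | false =>
            have hg : (pvStepA d p).getD k "" = p.2 := by
              unfold pvStepA
              rw [if_neg (by rw [hpk, h]; simp)]
              rw [hpk, PySem.Dict.getD_insert_self]
            rw [hg]
            simp
      · have hc : (pvStepA d p).contains k = d.contains k := by
          unfold pvStepA
          have hne : (k == p.1) = false := beq_eq_false_iff_ne.mpr (fun h' => hpk h'.symm)
          split <;> rw [PySem.Dict.contains_insert] <;> simp [hne]
        have hg : (pvStepA d p).getD k "" = d.getD k "" := by
          unfold pvStepA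
          split <;> exact PySem.Dict.getD_insert_of_ne _ _ _ (fun h' => hpk h'.symm)
        have hfil : (p :: rest).filter (fun q => q.1 == k) = rest.filter (fun q => q.1 == k) := by
          simp [hpk]
        rw [hc, hg, hfil]

-- A's loop body, in the shape keys_foldl_insert_key expects (both branches insert at p.1)
theorem pvStepA_eq_insert : pvStepA = fun d p =>
    d.insert p.1 (if d.contains p.1 then d.getD p.1 "" ++ "," ++ p.2 else p.2) := by
  funext d p
  unfold pvStepA
  split <;> simp_all

theorem foldA_keys (pairs : List (String × String)) :
    (pairs.foldl pvStepA PySem.Dict.empty).keys = PySem.Set.ofList (pairs.map (·.1)) := by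
  rw [pvStepA_eq_insert]
  rw [PySem.Dict.keys_foldl_insert_key pairs (fun p => p.1)
    (fun d p => if d.contains p.1 then d.getD p.1 "" ++ "," ++ p.2 else p.2) PySem.Dict.empty]
  rw [PySem.Set.ofList_eq_foldl]
  simp [PySem.Set.update, PySem.Dict.keys_empty]

-- ===== VERDICT (by name: the statement is the Claim_ definition above) =====
set_option maxHeartbeats 1000000 in
theorem sort_params_py_spec : Claim_equal_sort_params_py := by
  intro params_str _ _
  simp only [Spec_sort_params_py, sort_params_py, sort_params_py_alt]
  split
  · rfl
  · have hfold : ((PySem.Str.split? params_str "&").getD []).foldl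
        (fun d token => pvStepA d (pvSplitEq token)) PySem.Dict.empty
        = (((PySem.Str.split? params_str "&").getD []).map pvSplitEq).foldl pvStepA
            PySem.Dict.empty := by rw [List.foldl_map]
    rw [hfold, foldA_keys]
    congr 1
    congr 1
    funext k
    rw [foldA_getD _ k PySem.Dict.empty]
    rw [if_neg (by simp [PySem.Dict.contains_empty])]
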